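-- pv_equiv track=rewrite | github.com/Person-Maink/localmodels- | analysis/Frequency Analysis/Multi Point to Point.py | _select_graph_neighbors
-- ===== SOURCE A (Python) =====
-- from collections import deque
--
-- def _select_graph_neighbors(seed, adjacency, n_neighbors):
--     visited = {seed}
--     queue = deque([(seed, 0)])
--     ranked = []
--
--     while queue:
--         node, dist = queue.popleft()
--         for nb in adjacency[node]:
--             if nb in visited:
--                 continue
--             visited.add(nb)
--             next_dist = dist + 1
--             ranked.append((next_dist, nb))
--             queue.append((nb, next_dist))
--
--     ranked.sort(key=lambda x: (x[0], x[1]))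
--     return [vertex_id for _, vertex_id in ranked[:n_neighbors]]
-- ===== SOURCE B (Python) =====
-- def _select_graph_neighbors(seed, adjacency, n_neighbors):
--     reach = {seed}
--     frontier = {seed}
--     order = []
--     while frontier:
--         discovered = {nb for u in frontier for nb in adjacency[u]} - reach
--         order.extend(sorted(discovered))
--         reach |= discovered
--         frontier = discovered
--     return order[:n_neighbors]
-- ===== Notes on version B (the rewrite author's own statement) =====
-- stated objective: alternative
-- what changed: Replaces the FIFO-queue BFS that tags every discovered node with its distance and finally sorts the whole discovery list by (distance, id) with a frontier-set fixpoint iteration: each round forms the set of all neighbors of the current frontier, subtracts the reached set with a set difference, appends that batch sorted by id, and unions it into the reached set - no queue, no stored distances, no global sort.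
import Mathlib
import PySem

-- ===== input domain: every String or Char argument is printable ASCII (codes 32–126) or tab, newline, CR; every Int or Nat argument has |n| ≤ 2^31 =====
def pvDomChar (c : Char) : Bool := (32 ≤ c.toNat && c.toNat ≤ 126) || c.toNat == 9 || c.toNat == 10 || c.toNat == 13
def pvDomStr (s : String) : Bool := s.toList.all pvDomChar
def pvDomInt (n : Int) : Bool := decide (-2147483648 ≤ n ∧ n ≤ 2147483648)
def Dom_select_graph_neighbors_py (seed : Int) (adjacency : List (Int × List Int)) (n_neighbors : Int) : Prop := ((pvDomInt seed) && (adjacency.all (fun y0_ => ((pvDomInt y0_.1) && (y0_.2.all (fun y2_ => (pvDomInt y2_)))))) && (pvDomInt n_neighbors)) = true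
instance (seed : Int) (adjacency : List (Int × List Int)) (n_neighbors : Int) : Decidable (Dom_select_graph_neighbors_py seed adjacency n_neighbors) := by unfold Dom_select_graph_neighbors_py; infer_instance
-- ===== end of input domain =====

-- B replaces A's FIFO-queue BFS (which records (distance, node) for every discovery and
-- globally sorts that list at the end) by a frontier-set fixpoint iteration built on set
-- difference/union, appending each round's batch sorted by id — an alternative algorithm,
-- not faster.  Both while loops are ported with an explicit fuel argument (a totality
-- guard only: one edge occurrence is consumed per queue pop / per level, so
-- |all neighbor occurrences| + 1 rounds always suffice — proved in the lemmas below).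

-- ===== PORT A =====
-- the while loop of A: queue of (node, dist), FIFO; adjacency[node] (KeyError when node is
-- no key — excluded by Pre_) is ported as getD _ [].
def pvALoop (adjacency : List (Int × List Int)) :
    Nat → List (Int × Int) → PySem.Set Int → List (Int × Int) → List (Int × Int)
  | _, [], _, ranked => ranked
  | 0, _ :: _, _, ranked => ranked
  | fuel + 1, (node, dist) :: rest, visited, ranked =>
    let st := (PySem.Dict.getD ⟨adjacency⟩ node []).foldl
      (fun (st : PySem.Set Int × List (Int × Int) × List (Int × Int)) nb =>
        if PySem.Set.contains st.1 nb then st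
        else (PySem.Set.add st.1 nb, st.2.1 ++ [(dist + 1, nb)], st.2.2 ++ [(nb, dist + 1)]))
      (visited, ranked, rest)
    pvALoop adjacency fuel st.2.2 st.1 st.2.1

def select_graph_neighbors_py (seed : Int) (adjacency : List (Int × List Int)) (n_neighbors : Int) : List Int :=
  let visited : PySem.Set Int := PySem.Set.ofList [seed]
  let queue : List (Int × Int) := [(seed, 0)]
  let ranked : List (Int × Int) := []
  let ranked := pvALoop adjacency ((adjacency.flatMap (fun p => p.2)).length + 1) queue visited ranked
  let ranked := PySem.List.sorted2 ranked (fun x => x.1) (fun x => x.2)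
  (PySem.List.slice ranked none (some n_neighbors)).map (fun x => x.2)

-- ===== PORT B =====
-- one round of B: the set comprehension {nb for u in frontier for nb in adjacency[u]}
-- minus the reached set (same KeyError note as A: getD under Pre_)
def pvDiscover (adjacency : List (Int × List Int)) (reach frontier : PySem.Set Int) :
    PySem.Set Int :=
  PySem.Set.diff
    (PySem.Set.ofList (frontier.flatMap (fun u => PySem.Dict.getD ⟨adjacency⟩ u []))) reach

-- the while loop of B: fixpoint iteration on (reach, frontier) sets
def pvBLoop (adjacency : List (Int × List Int)) :
    Nat → PySem.Set Int → PySem.Set Int → List Int → List Int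
  | 0, _, _, order => order
  | fuel + 1, reach, frontier, order =>
    if frontier = [] then order
    else
      let discovered := pvDiscover adjacency reach frontier
      pvBLoop adjacency fuel (PySem.Set.update reach discovered) discovered
        (order ++ PySem.List.sorted discovered (fun x => x))

def select_graph_neighbors_py_alt (seed : Int) (adjacency : List (Int × List Int)) (n_neighbors : Int) : List Int :=
  let reach : PySem.Set Int := PySem.Set.ofList [seed]
  let frontier : PySem.Set Int := PySem.Set.ofList [seed]
  let order := pvBLoop adjacency ((adjacency.flatMap (fun p => p.2)).length + 1) reach frontier []
  PySem.List.slice order none (some n_neighbors)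

-- ===== PRECONDITION & SPEC =====
-- every node reachable from the seed along adjacency edges, computed as the standard
-- |adjacency|-round transitive closure (after that many rounds the set is a fixpoint)
def pvReachable (seed : Int) (adjacency : List (Int × List Int)) : PySem.Set Int :=
  (List.range adjacency.length).foldl
    (fun s _ => adjacency.foldl
      (fun s p => if p.1 ∈ s then PySem.Set.update s p.2 else s) s)
    (PySem.Set.ofList [seed])

-- Pre_ requires every node reachable from the seed to be a key of adjacency: A raises
-- KeyError exactly when its BFS dequeues a node that is not a key, i.e. exactly when a
-- reachable node is missing (the seed itself included).
def Pre_select_graph_neighbors_py (seed : Int) (adjacency : List (Int × List Int)) (n_neighbors : Int) : Prop :=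
  ∀ x ∈ pvReachable seed adjacency, ∃ p ∈ adjacency, p.1 = x
instance (seed : Int) (adjacency : List (Int × List Int)) (n_neighbors : Int) : Decidable (Pre_select_graph_neighbors_py seed adjacency n_neighbors) := by unfold Pre_select_graph_neighbors_py; infer_instance

def pvWitness_select_graph_neighbors_py : Int × (List (Int × List Int)) × Int :=
  (0, [(0, [1, 2]), (1, [0]), (2, [1])], 2)

def Spec_select_graph_neighbors_py (seed : Int) (adjacency : List (Int × List Int)) (n_neighbors : Int) (out : List Int) : Prop := out = select_graph_neighbors_py_alt seed adjacency n_neighbors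
instance (seed : Int) (adjacency : List (Int × List Int)) (n_neighbors : Int) (out : List Int) : Decidable (Spec_select_graph_neighbors_py seed adjacency n_neighbors out) := by unfold Spec_select_graph_neighbors_py; infer_instance

-- ===== CLAIM (what is proved, stated in full; the proofs are below) =====
def Claim_equal_select_graph_neighbors_py : Prop := ∀ (seed : Int) (adjacency : List (Int × List Int)) (n_neighbors : Int), Dom_select_graph_neighbors_py seed adjacency n_neighbors → Pre_select_graph_neighbors_py seed adjacency n_neighbors → Spec_select_graph_neighbors_py seed adjacency n_neighbors (select_graph_neighbors_py seed adjacency n_neighbors)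

-- ===== LEMMAS AND PROOFS =====

-- number of occurrences of still-unvisited nodes among all neighbor lists: the measure
-- showing the stated fuel suffices for both loops
def pvUnseen (adjacency : List (Int × List Int)) (v : PySem.Set Int) : Nat :=
  ((adjacency.flatMap (fun p => p.2)).filter (fun x => !(PySem.Set.contains v x))).length

lemma pvFilter_lt_of_mem {l : List Int} {q : Int → Bool} {a : Int}
    (ha : a ∈ l) (hq : q a = false) : (l.filter q).length < l.length := by
  induction l with
  | nil => cases ha
  | cons x t ih =>
    rcases List.mem_cons.mp ha with h | h
    · subst h
      have := List.length_filter_le q t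
      simp only [List.filter_cons, hq, Bool.false_eq_true, if_false, List.length_cons]
      omega
    · have := ih h
      by_cases hx : q x = true <;>
        simp only [List.filter_cons, hx, Bool.false_eq_true, if_true, if_false, List.length_cons] <;>
        omega

lemma pvContains_eq (s : PySem.Set Int) (x : Int) :
    PySem.Set.contains s x = decide (x ∈ s) := by
  by_cases h : x ∈ s <;> simp [PySem.Set.contains, h]

lemma pvUnseen_add_lt (adjacency : List (Int × List Int)) (v : PySem.Set Int) (nb : Int)
    (h1 : nb ∈ adjacency.flatMap (fun p => p.2)) (h2 : PySem.Set.contains v nb = false) :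
    pvUnseen adjacency (PySem.Set.add v nb) < pvUnseen adjacency v := by
  have hnb : ¬ nb ∈ v := by simpa [pvContains_eq] using h2
  unfold pvUnseen
  set l := adjacency.flatMap (fun p => p.2) with hl
  have hsub : l.filter (fun x => !(PySem.Set.contains (PySem.Set.add v nb) x))
      = (l.filter (fun x => !(PySem.Set.contains v x))).filter (fun x => !(decide (x = nb))) := by
    rw [List.filter_filter]
    apply List.filter_congr
    intro x _
    by_cases hx1 : x ∈ v <;> by_cases hx2 : x = nb <;>
      simp [PySem.Set.mem_add, hx1, hx2]
  rw [hsub]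
  apply pvFilter_lt_of_mem (a := nb)
  · exact List.mem_filter.mpr ⟨h1, by simp [hnb]⟩
  · simp

lemma pvGetD_subset (adjacency : List (Int × List Int)) (node x : Int)
    (hx : x ∈ PySem.Dict.getD ⟨adjacency⟩ node []) : x ∈ adjacency.flatMap (fun p => p.2) := by
  induction adjacency with
  | nil => simp [PySem.Dict.getD, PySem.Dict.get?] at hx
  | cons p rest ih =>
    simp only [PySem.Dict.getD, PySem.Dict.get?, List.find?] at hx ih
    by_cases h : (p.1 == node) = true
    · simp only [h, Option.map_some, Option.getD_some] at hx
      exact List.mem_flatMap.mpr ⟨p, List.mem_cons_self , hx⟩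
    · simp only [h] at hx
      have := ih hx
      simp only [List.flatMap_cons, List.mem_append]
      right; exact this

-- adding a nodup batch of unseen graph nodes shrinks pvUnseen by at least the batch size
lemma pvUnseen_update_le (adjacency : List (Int × List Int)) (v : PySem.Set Int)
    (l : List Int) (hn : l.Nodup)
    (hm : ∀ x ∈ l, x ∈ adjacency.flatMap (fun p => p.2) ∧ ¬ x ∈ v) :
    pvUnseen adjacency (PySem.Set.update v l) + l.length ≤ pvUnseen adjacency v := by
  induction l generalizing v with
  | nil => simp [PySem.Set.update]
  | cons x rest ih =>
    rw [PySem.Set.update_cons]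
    obtain ⟨hx1, hx2⟩ := hm x List.mem_cons_self
    have hlt := pvUnseen_add_lt adjacency v x hx1 (by simp [hx2])
    have hrest := ih (PySem.Set.add v x) (List.nodup_cons.mp hn).2 (by
      intro y hy
      obtain ⟨hy1, hy2⟩ := hm y (List.mem_cons_of_mem _ hy)
      refine ⟨hy1, ?_⟩
      rw [PySem.Set.mem_add]
      rintro (h | h)
      · exact hy2 h
      · exact (List.nodup_cons.mp hn).1 (h ▸ hy))
    simp only [List.length_cons]
    omega

lemma pvDiscover_mem (adjacency : List (Int × List Int)) (reach frontier : PySem.Set Int)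
    (x : Int) : x ∈ pvDiscover adjacency reach frontier
      ↔ (∃ u ∈ frontier, x ∈ PySem.Dict.getD ⟨adjacency⟩ u []) ∧ ¬ x ∈ reach := by
  simp [pvDiscover, PySem.Set.mem_diff, PySem.Set.mem_ofList, List.mem_flatMap]

lemma pvDiscover_nodup (adjacency : List (Int × List Int)) (reach frontier : PySem.Set Int) :
    (pvDiscover adjacency reach frontier).Nodup :=
  PySem.Set.nodup_diff _ reach (PySem.Set.nodup_ofList _)

-- both loops ignore the fuel once their worklist is empty
lemma pvALoop_nil (adjacency : List (Int × List Int)) (fuel : Nat) (v : PySem.Set Int)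
    (r : List (Int × Int)) : pvALoop adjacency fuel [] v r = r := by
  cases fuel <;> rfl

lemma pvBLoop_nil (adjacency : List (Int × List Int)) (fuel : Nat) (reach : PySem.Set Int)
    (order : List Int) : pvBLoop adjacency fuel reach [] order = order := by
  cases fuel <;> simp [pvBLoop]

-- abstract per-node / per-level expansion: vocabulary for A's layer decomposition
def pvNbrs (adjacency : List (Int × List Int)) (x : Int) : List Int :=
  PySem.Dict.getD ⟨adjacency⟩ x []

def pvGrow (st : PySem.Set Int × List Int) (nb : Int) : PySem.Set Int × List Int :=
  if PySem.Set.contains st.1 nb then st else (PySem.Set.add st.1 nb, st.2 ++ [nb])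

def pvExpand1 (adjacency : List (Int × List Int)) (v : PySem.Set Int) (x : Int) :
    PySem.Set Int × List Int :=
  (pvNbrs adjacency x).foldl pvGrow (v, [])

def pvExpandL (adjacency : List (Int × List Int)) (v : PySem.Set Int) (front : List Int) :
    PySem.Set Int × List Int :=
  front.foldl
    (fun st x => ((pvExpand1 adjacency st.1 x).1, st.2 ++ (pvExpand1 adjacency st.1 x).2)) (v, [])

lemma pvGrow_acc (nbs : List Int) (v : PySem.Set Int) (acc : List Int) :
    nbs.foldl pvGrow (v, acc)
      = ((nbs.foldl pvGrow (v, [])).1, acc ++ (nbs.foldl pvGrow (v, [])).2) := by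
  induction nbs generalizing v acc with
  | nil => simp
  | cons nb rest ih =>
    simp only [List.foldl_cons]
    by_cases hc : PySem.Set.contains v nb = true
    · simp only [pvGrow, hc, if_pos]
      exact ih v acc
    · simp only [pvGrow, hc, Bool.false_eq_true, if_false, List.nil_append]
      rw [ih (PySem.Set.add v nb) (acc ++ [nb]), ih (PySem.Set.add v nb) [nb]]
      simp

lemma pvExpandL_acc (adjacency : List (Int × List Int)) (front : List Int)
    (v : PySem.Set Int) (acc : List Int) :
    front.foldl
      (fun st x => ((pvExpand1 adjacency st.1 x).1, st.2 ++ (pvExpand1 adjacency st.1 x).2)) (v, acc)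
      = ((pvExpandL adjacency v front).1, acc ++ (pvExpandL adjacency v front).2) := by
  induction front generalizing v acc with
  | nil => simp [pvExpandL]
  | cons x rest ih =>
    simp only [pvExpandL, List.foldl_cons]
    rw [ih (pvExpand1 adjacency v x).1 (acc ++ (pvExpand1 adjacency v x).2),
        ih (pvExpand1 adjacency v x).1 ([] ++ (pvExpand1 adjacency v x).2)]
    simp [pvExpandL]

lemma pvExpandL_cons (adjacency : List (Int × List Int)) (x : Int) (rest : List Int)
    (v : PySem.Set Int) :
    pvExpandL adjacency v (x :: rest)
      = ((pvExpandL adjacency (pvExpand1 adjacency v x).1 rest).1,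
         (pvExpand1 adjacency v x).2 ++ (pvExpandL adjacency (pvExpand1 adjacency v x).1 rest).2) := by
  show List.foldl _ _ (x :: rest) = _
  simp only [List.foldl_cons]
  rw [pvExpandL_acc]
  simp

-- membership / nodup characterization of one pvGrow run
lemma pvGrow_char (nbs : List Int) (v : PySem.Set Int) :
    (∀ x : Int, x ∈ (nbs.foldl pvGrow (v, [])).1 ↔ x ∈ v ∨ x ∈ nbs)
    ∧ (∀ x : Int, x ∈ (nbs.foldl pvGrow (v, [])).2 ↔ x ∈ nbs ∧ ¬ x ∈ v)
    ∧ (nbs.foldl pvGrow (v, [])).2.Nodup := by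
  induction nbs generalizing v with
  | nil => simp
  | cons nb rest ih =>
    simp only [List.foldl_cons]
    by_cases hc : PySem.Set.contains v nb = true
    · have hnb : nb ∈ v := by simpa [pvContains_eq] using hc
      simp only [pvGrow, hc, if_pos]
      obtain ⟨h1, h2, h3⟩ := ih v
      refine ⟨fun x => ?_, fun x => ?_, h3⟩
      · rw [h1 x]
        constructor
        · rintro (h | h)
          · exact Or.inl h
          · exact Or.inr (List.mem_cons_of_mem _ h)
        · rintro (h | h)
          · exact Or.inl h
          · rcases List.mem_cons.mp h with h | h
            · subst h; exact Or.inl hnb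
            · exact Or.inr h
      · rw [h2 x]
        constructor
        · rintro ⟨h, hv⟩
          exact ⟨List.mem_cons_of_mem _ h, hv⟩
        · rintro ⟨h, hv⟩
          rcases List.mem_cons.mp h with h | h
          · subst h; exact absurd hnb hv
          · exact ⟨h, hv⟩
    · have hnb : ¬ nb ∈ v := by
        intro h
        exact hc (by simpa [pvContains_eq] using h)
      simp only [pvGrow, hc, Bool.false_eq_true, if_false, List.nil_append]
      rw [pvGrow_acc rest (PySem.Set.add v nb) [nb]]
      obtain ⟨h1, h2, h3⟩ := ih (PySem.Set.add v nb)
      refine ⟨fun x => ?_, fun x => ?_, ?_⟩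
      · simp only
        rw [h1 x, PySem.Set.mem_add]
        constructor
        · rintro ((h | h) | h)
          · exact Or.inl h
          · subst h; exact Or.inr List.mem_cons_self
          · exact Or.inr (List.mem_cons_of_mem _ h)
        · rintro (h | h)
          · exact Or.inl (Or.inl h)
          · rcases List.mem_cons.mp h with h | h
            · subst h; exact Or.inl (Or.inr rfl)
            · exact Or.inr h
      · simp only [List.singleton_append, List.mem_cons]
        rw [h2 x, PySem.Set.mem_add]
        constructor
        · rintro (h | ⟨h, hv⟩)
          · exact ⟨Or.inl h, h ▸ hnb⟩
          · exact ⟨Or.inr h, fun hx => hv (Or.inl hx)⟩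
        · rintro ⟨h | h, hv⟩
          · exact Or.inl h
          · by_cases hxe : x = nb
            · exact Or.inl hxe
            · refine Or.inr ⟨h, ?_⟩
              rintro (h' | h')
              · exact hv h'
              · exact hxe h'
      · simp only [List.singleton_append, List.nodup_cons]
        refine ⟨fun hmem => ?_, h3⟩
        have := (h2 nb).mp hmem
        exact this.2 (by rw [PySem.Set.mem_add]; exact Or.inr rfl)

-- membership / nodup characterization of one level expansion
lemma pvExpandL_char (adjacency : List (Int × List Int)) (front : List Int)
    (v : PySem.Set Int) :
    (∀ x : Int, x ∈ (pvExpandL adjacency v front).1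
        ↔ x ∈ v ∨ ∃ y ∈ front, x ∈ pvNbrs adjacency y)
    ∧ (∀ x : Int, x ∈ (pvExpandL adjacency v front).2
        ↔ (∃ y ∈ front, x ∈ pvNbrs adjacency y) ∧ ¬ x ∈ v)
    ∧ (pvExpandL adjacency v front).2.Nodup := by
  induction front generalizing v with
  | nil => simp [pvExpandL]
  | cons y rest ih =>
    rw [pvExpandL_cons]
    obtain ⟨g1, g2, g3⟩ := pvGrow_char (pvNbrs adjacency y) v
    obtain ⟨h1, h2, h3⟩ := ih (pvExpand1 adjacency v y).1
    have e1mem : ∀ x : Int, x ∈ (pvExpand1 adjacency v y).1 ↔ x ∈ v ∨ x ∈ pvNbrs adjacency y := g1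
    have e2mem : ∀ x : Int, x ∈ (pvExpand1 adjacency v y).2 ↔ x ∈ pvNbrs adjacency y ∧ ¬ x ∈ v := g2
    refine ⟨fun x => ?_, fun x => ?_, ?_⟩
    · simp only
      rw [h1 x, e1mem x]
      constructor
      · rintro ((h | h) | ⟨z, hz, hx⟩)
        · exact Or.inl h
        · exact Or.inr ⟨y, List.mem_cons_self, h⟩
        · exact Or.inr ⟨z, List.mem_cons_of_mem _ hz, hx⟩
      · rintro (h | ⟨z, hz, hx⟩)
        · exact Or.inl (Or.inl h)
        · rcases List.mem_cons.mp hz with h | h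
          · subst h; exact Or.inl (Or.inr hx)
          · exact Or.inr ⟨z, h, hx⟩
    · simp only [List.mem_append]
      rw [h2 x, e2mem x]
      constructor
      · rintro (⟨h, hv⟩ | ⟨⟨z, hz, hx⟩, hv⟩)
        · exact ⟨⟨y, List.mem_cons_self, h⟩, hv⟩
        · rw [e1mem x] at hv
          exact ⟨⟨z, List.mem_cons_of_mem _ hz, hx⟩, fun h => hv (Or.inl h)⟩
      · rintro ⟨⟨z, hz, hx⟩, hv⟩
        rcases List.mem_cons.mp hz with h | h
        · subst h; exact Or.inl ⟨hx, hv⟩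
        · by_cases hy : x ∈ pvNbrs adjacency y
          · exact Or.inl ⟨hy, hv⟩
          · refine Or.inr ⟨⟨z, h, hx⟩, ?_⟩
            rw [e1mem x]
            rintro (h' | h')
            · exact hv h'
            · exact hy h'
    · rw [List.nodup_append]
      refine ⟨g3, h3, ?_⟩
      intro x hx z hz heq
      subst heq
      have hin : x ∈ (pvExpand1 adjacency v y).1 := by
        rw [e1mem x]
        exact Or.inr ((e2mem x).mp hx).1
      exact ((h2 x).mp hz).2 hin

-- pvUnseen depends on the visited set only through membership
lemma pvUnseen_congr (adjacency : List (Int × List Int)) {v w : PySem.Set Int}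
    (h : ∀ x : Int, x ∈ v ↔ x ∈ w) : pvUnseen adjacency v = pvUnseen adjacency w := by
  unfold pvUnseen
  congr 1
  apply List.filter_congr
  intro x _
  simp [pvContains_eq, h x]

-- fuel bound for the layer decomposition
lemma pvExpandLBound (adjacency : List (Int × List Int)) (v : PySem.Set Int) (front : List Int) :
    pvUnseen adjacency (pvExpandL adjacency v front).1 + (pvExpandL adjacency v front).2.length
      ≤ pvUnseen adjacency v := by
  obtain ⟨h1, h2, h3⟩ := pvExpandL_char adjacency front v
  have hupd := pvUnseen_update_le adjacency v (pvExpandL adjacency v front).2 h3 (by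
    intro x hx
    obtain ⟨⟨y, _, hy⟩, hv⟩ := (h2 x).mp hx
    exact ⟨pvGetD_subset adjacency y x hy, hv⟩)
  have hcong : pvUnseen adjacency (pvExpandL adjacency v front).1
      = pvUnseen adjacency (PySem.Set.update v (pvExpandL adjacency v front).2) := by
    apply pvUnseen_congr
    intro x
    rw [h1 x, PySem.Set.mem_update]
    constructor
    · rintro (h | h)
      · exact Or.inl h
      · by_cases hv : x ∈ v
        · exact Or.inl hv
        · exact Or.inr ((h2 x).mpr ⟨h, hv⟩)
    · rintro (h | h)
      · exact Or.inl h
      · obtain ⟨⟨y, hy, hxy⟩, _⟩ := (h2 x).mp h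
        exact Or.inr ⟨y, hy, hxy⟩
  omega

-- A's discovery list, layer by layer (discovery order inside a layer)
def pvLayersR (adjacency : List (Int × List Int)) (v : PySem.Set Int) (front : List Int)
    (d : Int) : List (Int × Int) :=
  if front = [] then []
  else
    (pvExpandL adjacency v front).2.map (fun x => (d + 1, x))
      ++ pvLayersR adjacency (pvExpandL adjacency v front).1 (pvExpandL adjacency v front).2 (d + 1)
termination_by pvUnseen adjacency v + (if front = [] then 0 else 1)
decreasing_by
  rename_i hfr
  have hb := pvExpandLBound adjacency v front
  by_cases hnil : (pvExpandL adjacency v front).2 = []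
  · rw [if_neg hfr, if_pos hnil]
    simp only [hnil, List.length_nil] at hb
    omega
  · rw [if_neg hfr, if_neg hnil]
    have hlen := List.length_pos_of_ne_nil hnil
    omega

-- the same layers with each layer sorted (what the global sort of A produces)
def pvFlat (adjacency : List (Int × List Int)) (v : PySem.Set Int) (front : List Int)
    (d : Int) : List (Int × Int) :=
  if front = [] then []
  else
    (PySem.List.sorted (pvExpandL adjacency v front).2 (fun x => x)).map (fun x => (d + 1, x))
      ++ pvFlat adjacency (pvExpandL adjacency v front).1 (pvExpandL adjacency v front).2 (d + 1)
termination_by pvUnseen adjacency v + (if front = [] then 0 else 1)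
decreasing_by
  rename_i hfr
  have hb := pvExpandLBound adjacency v front
  by_cases hnil : (pvExpandL adjacency v front).2 = []
  · rw [if_neg hfr, if_pos hnil]
    simp only [hnil, List.length_nil] at hb
    omega
  · rw [if_neg hfr, if_neg hnil]
    have hlen := List.length_pos_of_ne_nil hnil
    omega

-- A's inner for-loop in terms of pvGrow
lemma pvAInner (adjacency : List (Int × List Int)) (d : Int) (nbs : List Int)
    (v : PySem.Set Int) (r q : List (Int × Int)) :
    nbs.foldl
      (fun (st : PySem.Set Int × List (Int × Int) × List (Int × Int)) nb =>
        if PySem.Set.contains st.1 nb then st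
        else (PySem.Set.add st.1 nb, st.2.1 ++ [(d, nb)], st.2.2 ++ [(nb, d)])) (v, r, q)
      = ((nbs.foldl pvGrow (v, [])).1,
         r ++ (nbs.foldl pvGrow (v, [])).2.map (fun x => (d, x)),
         q ++ (nbs.foldl pvGrow (v, [])).2.map (fun x => (x, d))) := by
  induction nbs generalizing v r q with
  | nil => simp
  | cons nb rest ih =>
    simp only [List.foldl_cons]
    by_cases hc : PySem.Set.contains v nb = true
    · rw [if_pos hc]
      simp only [pvGrow, hc, if_pos]
      exact ih v r q
    · rw [if_neg hc]
      simp only [pvGrow, hc, Bool.false_eq_true, if_false]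
      rw [ih (PySem.Set.add v nb) (r ++ [(d, nb)]) (q ++ [(nb, d)])]
      simp only [List.nil_append]
      rw [pvGrow_acc rest (PySem.Set.add v nb) [nb]]
      simp

-- the queue loop of A processed one whole layer at a time (one fuel unit per queue pop)
lemma pvALoop_layer (adjacency : List (Int × List Int)) (front : List Int) :
    ∀ (fuel : Nat) (pend : List Int) (d : Int) (v : PySem.Set Int) (r : List (Int × Int)),
    pvALoop adjacency (front.length + fuel)
        (front.map (fun x => (x, d)) ++ pend.map (fun x => (x, d + 1))) v r
      = pvALoop adjacency fuel
          ((pend ++ (pvExpandL adjacency v front).2).map (fun x => (x, d + 1)))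
          (pvExpandL adjacency v front).1
          (r ++ (pvExpandL adjacency v front).2.map (fun x => (d + 1, x))) := by
  induction front with
  | nil =>
    intro fuel pend d v r
    simp [pvExpandL]
  | cons x rest ih =>
    intro fuel pend d v r
    rw [List.map_cons, List.cons_append]
    have hfl : (x :: rest).length + fuel = (rest.length + fuel) + 1 := by
      simp [Nat.add_right_comm]
    rw [hfl]
    have hstep : pvALoop adjacency ((rest.length + fuel) + 1)
        ((x, d) :: (rest.map (fun y => (y, d)) ++ pend.map (fun y => (y, d + 1)))) v r
        = pvALoop adjacency (rest.length + fuel)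
          (((PySem.Dict.getD ⟨adjacency⟩ x []).foldl
            (fun (st : PySem.Set Int × List (Int × Int) × List (Int × Int)) nb =>
              if PySem.Set.contains st.1 nb then st
              else (PySem.Set.add st.1 nb, st.2.1 ++ [(d + 1, nb)], st.2.2 ++ [(nb, d + 1)]))
            (v, r, rest.map (fun y => (y, d)) ++ pend.map (fun y => (y, d + 1))))).2.2
          (((PySem.Dict.getD ⟨adjacency⟩ x []).foldl
            (fun (st : PySem.Set Int × List (Int × Int) × List (Int × Int)) nb =>
              if PySem.Set.contains st.1 nb then st
              else (PySem.Set.add st.1 nb, st.2.1 ++ [(d + 1, nb)], st.2.2 ++ [(nb, d + 1)]))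
            (v, r, rest.map (fun y => (y, d)) ++ pend.map (fun y => (y, d + 1))))).1
          (((PySem.Dict.getD ⟨adjacency⟩ x []).foldl
            (fun (st : PySem.Set Int × List (Int × Int) × List (Int × Int)) nb =>
              if PySem.Set.contains st.1 nb then st
              else (PySem.Set.add st.1 nb, st.2.1 ++ [(d + 1, nb)], st.2.2 ++ [(nb, d + 1)]))
            (v, r, rest.map (fun y => (y, d)) ++ pend.map (fun y => (y, d + 1))))).2.1 := by
      conv_lhs => rw [pvALoop]
    rw [hstep]
    have hinner := pvAInner adjacency (d + 1) (PySem.Dict.getD ⟨adjacency⟩ x [])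
      v r (rest.map (fun y => (y, d)) ++ pend.map (fun y => (y, d + 1)))
    simp only [hinner]
    have hq : (rest.map (fun x => (x, d)) ++ pend.map (fun x => (x, d + 1)))
        ++ ((PySem.Dict.getD ⟨adjacency⟩ x []).foldl pvGrow (v, [])).2.map (fun x => (x, d + 1))
        = rest.map (fun x => (x, d))
          ++ (pend ++ (pvExpand1 adjacency v x).2).map (fun x => (x, d + 1)) := by
      simp [pvExpand1, pvNbrs, List.map_append]
    rw [hq]
    have hE : List.foldl pvGrow (v, []) (PySem.Dict.getD ⟨adjacency⟩ x [])
        = pvExpand1 adjacency v x := rfl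
    rw [hE, ih fuel (pend ++ (pvExpand1 adjacency v x).2) d (pvExpand1 adjacency v x).1
          (r ++ (pvExpand1 adjacency v x).2.map (fun x => (d + 1, x))),
        pvExpandL_cons]
    simp [List.map_append, List.append_assoc]

-- with fuel ≥ frontier size + unseen occurrences the queue loop computes all the layers
lemma pvALoop_layers (adjacency : List (Int × List Int)) (v : PySem.Set Int)
    (front : List Int) (d : Int) :
    ∀ (fuel : Nat) (r : List (Int × Int)),
      front.length + pvUnseen adjacency v ≤ fuel →
      pvALoop adjacency fuel (front.map (fun x => (x, d))) v r
        = r ++ pvLayersR adjacency v front d := by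
  induction v, front, d using pvLayersR.induct adjacency with
  | case1 v d =>
    intro fuel r _
    rw [pvLayersR]
    simp [pvALoop_nil]
  | case2 v front d hfr ih =>
    intro fuel r hfuel
    have hsplit : fuel = front.length + (fuel - front.length) := by omega
    rw [hsplit]
    have h0 := pvALoop_layer adjacency front (fuel - front.length) [] d v r
    simp only [List.map_nil, List.append_nil, List.nil_append] at h0
    rw [h0, ih]
    · conv_rhs => rw [pvLayersR]
      rw [if_neg hfr]
      simp
    · have hb := pvExpandLBound adjacency v front
      omega

-- Python's key=lambda x: (x[0], x[1]) is the lexicographic order on the pairs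
lemma pvInsertBy_congr {α : Type} (b1 b2 : α → α → Bool) (h : ∀ a b, b1 a b = b2 a b)
    (x : α) (l : List α) : PySem.List.insertBy b1 x l = PySem.List.insertBy b2 x l := by
  induction l with
  | nil => rfl
  | cons y ys ih =>
    simp only [PySem.List.insertBy, h x y]
    rw [ih]

lemma pvSorted2_eq_sorted_lex (xs : List (Int × Int)) :
    PySem.List.sorted2 xs (fun x => x.1) (fun x => x.2)
      = PySem.List.sorted xs (fun p => toLex p) := by
  have hb : ∀ a b : Int × Int,
      (decide (a.1 < b.1) || (!decide (b.1 < a.1) && decide (a.2 < b.2)))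
        = decide (toLex a < toLex b) := by
    intro a b
    rcases lt_trichotomy a.1 b.1 with h | h | h <;>
      by_cases h2 : a.2 < b.2 <;>
      simp [Prod.Lex.toLex_lt_toLex, h, h2] <;> omega
  unfold PySem.List.sorted2 PySem.List.sorted
  simp only [Bool.false_eq_true, if_false]
  congr 1
  funext acc x
  apply pvInsertBy_congr
  intro a b
  simpa using hb a b

lemma pvLayersR_fst (adjacency : List (Int × List Int)) (v : PySem.Set Int)
    (front : List Int) (d : Int) :
    ∀ p ∈ pvLayersR adjacency v front d, d < p.1 := by
  induction v, front, d using pvLayersR.induct adjacency with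
  | case1 v d =>
    rw [pvLayersR]
    simp
  | case2 v front d hfr ih =>
    intro p hp
    rw [pvLayersR, if_neg hfr] at hp
    rcases List.mem_append.mp hp with h | h
    · rcases List.mem_map.mp h with ⟨x, _, rfl⟩
      omega
    · have := ih p h
      omega

-- the global (dist, id) sort of A's discovery list = each layer sorted by id, concatenated
lemma pvSorted_layers (adjacency : List (Int × List Int)) (v : PySem.Set Int)
    (front : List Int) (d : Int) :
    PySem.List.sorted (pvLayersR adjacency v front d) (fun p => toLex p)
      = pvFlat adjacency v front d := by
  induction v, front, d using pvFlat.induct adjacency with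
  | case1 v d =>
    rw [pvLayersR, pvFlat]
    simp [(PySem.List.sorted_eq_nil_iff _ _ _).mpr rfl]
  | case2 v front d hfr ih =>
    rw [pvFlat, if_neg hfr]
    apply PySem.List.eq_of_perm_of_pairwise_le_of_injective (fun p : Int × Int => toLex p)
      (fun _ _ h => toLex.injective h)
    · refine (PySem.List.sorted_perm _ _ _).trans ?_
      rw [pvLayersR, if_neg hfr]
      refine List.Perm.append ?_ ?_
      · exact ((PySem.List.sorted_perm _ _ _).map _).symm
      · rw [← ih]
        exact (PySem.List.sorted_perm _ _ _).symm
    · exact PySem.List.sorted_pairwise _ _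
    · rw [List.pairwise_append]
      refine ⟨?_, ?_, ?_⟩
      · rw [List.pairwise_map]
        have := PySem.List.sorted_pairwise (pvExpandL adjacency v front).2 (fun x => x)
        apply this.imp
        intro a b hab
        rw [Prod.Lex.toLex_le_toLex]
        exact Or.inr ⟨rfl, hab⟩
      · rw [← ih]
        exact PySem.List.sorted_pairwise _ _
      · intro a ha b hb
        rcases List.mem_map.mp ha with ⟨x, _, rfl⟩
        rw [← ih, PySem.List.mem_sorted] at hb
        have := pvLayersR_fst adjacency _ _ _ b hb
        rw [Prod.Lex.toLex_le_toLex]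
        exact Or.inl (by simpa using this)

-- B's set-difference loop produces exactly the per-layer-sorted discovery list with the
-- distances dropped (one fuel unit per level); stated up to membership of reach and
-- permutation of the frontier
lemma pvBLoop_flat (adjacency : List (Int × List Int)) (v : PySem.Set Int)
    (front : List Int) (d : Int) :
    ∀ (fuel : Nat) (reach frontier : PySem.Set Int) (order : List Int),
      (∀ x : Int, x ∈ v ↔ x ∈ reach) → front.Perm frontier →
      pvUnseen adjacency v + 1 ≤ fuel →
      pvBLoop adjacency fuel reach frontier order
        = order ++ (pvFlat adjacency v front d).map (fun p => p.2) := by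
  induction v, front, d using pvFlat.induct adjacency with
  | case1 v d =>
    intro fuel reach frontier order hv hf _
    have : frontier = [] := List.perm_nil.mp hf.symm
    subst this
    rw [pvFlat]
    simp [pvBLoop_nil]
  | case2 v front d hfr ih =>
    intro fuel reach frontier order hv hf hfuel
    have hfr' : frontier ≠ [] := by
      intro h
      subst h
      exact hfr (List.perm_nil.mp hf)
    obtain ⟨e1, e2, e3⟩ := pvExpandL_char adjacency front v
    have hdmem : ∀ x : Int, x ∈ pvDiscover adjacency reach frontier
        ↔ x ∈ (pvExpandL adjacency v front).2 := by
      intro x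
      rw [pvDiscover_mem, e2 x]
      constructor
      · rintro ⟨⟨u, hu, hx⟩, hr⟩
        exact ⟨⟨u, hf.mem_iff.mpr hu, hx⟩, fun h => hr ((hv x).mp h)⟩
      · rintro ⟨⟨u, hu, hx⟩, hr⟩
        exact ⟨⟨u, hf.mem_iff.mp hu, hx⟩, fun h => hr ((hv x).mpr h)⟩
    have hperm : (pvExpandL adjacency v front).2.Perm (pvDiscover adjacency reach frontier) := by
      rw [List.perm_ext_iff_of_nodup e3 (pvDiscover_nodup adjacency reach frontier)]
      intro x
      exact (hdmem x).symm
    have hsorted : PySem.List.sorted (pvDiscover adjacency reach frontier) (fun x => x)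
        = PySem.List.sorted (pvExpandL adjacency v front).2 (fun x => x) :=
      PySem.List.sorted_eq_sorted_of_perm _ _ _ (fun _ _ h => h) hperm.symm
    have hnewmem : ∀ x : Int, x ∈ (pvExpandL adjacency v front).1
        ↔ x ∈ PySem.Set.update reach (pvDiscover adjacency reach frontier) := by
      intro x
      rw [e1 x, PySem.Set.mem_update, hdmem x, e2 x]
      constructor
      · rintro (h | h)
        · exact Or.inl ((hv x).mp h)
        · by_cases hr : x ∈ v
          · exact Or.inl ((hv x).mp hr)
          · exact Or.inr ⟨h, hr⟩
      · rintro (h | ⟨h, _⟩)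
        · exact Or.inl ((hv x).mpr h)
        · exact Or.inr h
    obtain ⟨f, rfl⟩ : ∃ f, fuel = f + 1 := ⟨fuel - 1, by omega⟩
    rw [pvBLoop, if_neg hfr']
    simp only []
    rw [hsorted]
    conv_rhs => rw [pvFlat, if_neg hfr]
    simp only [List.map_append, List.map_map]
    have hfst : ((fun p : Int × Int => p.2) ∘ fun x => (d + 1, x)) = id := rfl
    rw [hfst, List.map_id]
    by_cases hnil : (pvExpandL adjacency v front).2 = []
    · have hdisc : pvDiscover adjacency reach frontier = [] := by
        have h' := hperm.symm
        rw [hnil] at h'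
        exact List.perm_nil.mp h'
      rw [hdisc, pvBLoop_nil]
      rw [pvFlat]
      simp [hnil]
    · rw [ih f (PySem.Set.update reach (pvDiscover adjacency reach frontier))
            (pvDiscover adjacency reach frontier)
            (order ++ PySem.List.sorted (pvExpandL adjacency v front).2 (fun x => x))
            hnewmem hperm ?_]
      · simp [List.append_assoc]
      · have hb := pvExpandLBound adjacency v front
        have hlen := List.length_pos_of_ne_nil hnil
        omega

lemma pvSlice_map (xs : List (Int × Int)) (n : Int) :
    (PySem.List.slice xs none (some n)).map (fun p => p.2)
      = PySem.List.slice (xs.map (fun p => p.2)) none (some n) := by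
  simp [PySem.List.slice, List.map_take]

-- pvUnseen is at most the total number of neighbor occurrences: the ports' fuel suffices
lemma pvUnseen_le (adjacency : List (Int × List Int)) (v : PySem.Set Int) :
    pvUnseen adjacency v ≤ (adjacency.flatMap (fun p => p.2)).length :=
  List.length_filter_le _ _

-- ===== VERDICT (by name: the statement is the Claim_ definition above) =====
theorem select_graph_neighbors_py_spec : Claim_equal_select_graph_neighbors_py := by
  intro seed adjacency n_neighbors _hdom _hpre
  unfold Spec_select_graph_neighbors_py
  unfold select_graph_neighbors_py select_graph_neighbors_py_alt
  simp only []
  have hq0 : [((seed : Int), (0 : Int))] = ([seed] : List Int).map (fun x => (x, (0 : Int))) := rfl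
  have hof : PySem.Set.ofList [seed] = [seed] := rfl
  have hle := pvUnseen_le adjacency (PySem.Set.ofList [seed])
  rw [hq0, pvALoop_layers adjacency (PySem.Set.ofList [seed]) [seed] 0
        ((adjacency.flatMap (fun p => p.2)).length + 1) []
        (by simp only [List.length_cons, List.length_nil]; omega),
      List.nil_append, pvSorted2_eq_sorted_lex, pvSorted_layers,
      pvBLoop_flat adjacency (PySem.Set.ofList [seed]) [seed] 0
        ((adjacency.flatMap (fun p => p.2)).length + 1)
        (PySem.Set.ofList [seed]) (PySem.Set.ofList [seed]) []
        (fun _ => Iff.rfl) (by rw [hof]) (by omega),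
      List.nil_append, pvSlice_map]
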